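-- pv_equiv track=rewrite | github.com/scholer/rsenv | rsenv/seq/seqgen.py | genparts
-- ===== SOURCE A (Python) =====
-- from itertools import product, chain
--
-- atgc = "ATGC"
--
-- def genparts(length, seqs=None):
--     """
--     This function has two use cases:
--     1) Returns a generator of all possible sequences of length <length>.
--     2) Return a generator of all "sliding sequence frames" (if seqs is provided).
--     Examples (cast to list to make it easier to see the result):
--     >>> list(genparts(3))
--     ['AAA', 'AAT', 'AAG', 'AAC', 'ATA', 'ATT', 'ATG', 'ATC', 'AGA', 'AGT', 'AGG', 'AGC', 'ACA', 'ACT', 'ACG', 'ACC',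
--     'TAA', 'TAT', 'TAG', 'TAC', 'TTA', 'TTT', 'TTG', 'TTC', 'TGA', 'TGT', 'TGG', 'TGC', 'TCA', 'TCT', 'TCG', 'TCC',
--     'GAA', 'GAT', 'GAG', 'GAC', 'GTA', 'GTT', 'GTG', 'GTC', 'GGA', 'GGT', 'GGG', 'GGC', 'GCA', 'GCT', 'GCG', 'GCC',
--     'CAA', 'CAT', 'CAG', 'CAC', 'CTA', 'CTT', 'CTG', 'CTC', 'CGA', 'CGT', 'CGG', 'CGC', 'CCA', 'CCT', 'CCG', 'CCC']
--     >>> list(genparts(3, "ACGTTG"))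
--     ['ACG', 'CGT', 'GTT', 'TTG']
--     """
--     if seqs is None:
--         return ("".join(comb) for comb in product(atgc, repeat=length))
--     if isinstance(seqs, str):
--         combseq = seqs
--     else:
--         combseq = "".join(seqs)
--     return (combseq[i:i+length] for i in range(len(combseq)-length+1))
-- ===== SOURCE B (Python) =====
-- atgc = "ATGC"
--
-- def genparts(length, seqs=None):
--     """Same two use cases as A.  Branch 1 computes each sequence directly from
--     its rank: the k-th output is the base-4 representation of k (digits mapped
--     through ATGC, most significant first), so no cartesian product / prefix
--     extension is built at all -- a random-access closed form per index."""
--     if seqs is not None: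
--         combseq = seqs if isinstance(seqs, str) else "".join(seqs)
--         return (combseq[i:i+length] for i in range(len(combseq)-length+1))
--
--     def kth(k):
--         s = ""
--         for _ in range(length):
--             s = atgc[k % 4] + s
--             k //= 4
--         return s
--
--     return (kth(k) for k in range(4 ** length))
-- ===== Notes on version B (the rewrite author's own statement) =====
-- stated objective: alternative
-- what changed: Branch 1 replaces the itertools.product pipeline (incremental prefix extension of all partial tuples) with a rank-decoding closed form: it iterates k over range(4**length) and computes the k-th sequence independently as the base-4 digits of k mapped through ATGC, most significant first; the sliding-window branch is kept.
import Mathlib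
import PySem

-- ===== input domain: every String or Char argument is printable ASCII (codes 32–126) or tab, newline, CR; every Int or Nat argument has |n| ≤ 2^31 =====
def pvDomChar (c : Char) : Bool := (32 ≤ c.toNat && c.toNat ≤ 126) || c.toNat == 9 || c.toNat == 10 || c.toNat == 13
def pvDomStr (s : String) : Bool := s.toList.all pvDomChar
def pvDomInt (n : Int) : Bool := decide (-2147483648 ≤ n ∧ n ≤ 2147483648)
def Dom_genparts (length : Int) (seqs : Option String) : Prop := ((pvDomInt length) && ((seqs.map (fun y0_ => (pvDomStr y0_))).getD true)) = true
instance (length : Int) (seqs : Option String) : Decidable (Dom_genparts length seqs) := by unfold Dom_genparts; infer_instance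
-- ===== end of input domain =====

-- B replaces branch 1's itertools.product pipeline by a rank-decoding closed form
-- (the k-th output is computed independently as the base-4 digits of k mapped through
-- ATGC); the sliding-window branch is kept.  Objective: alternative (same cost).


-- ===== PORT A =====
-- product(atgc, repeat=length): iteratively extend each partial tuple by each
-- character of the pool (itertools.product's documented algorithm), then "".join.
def genparts (length : Int) (seqs : Option String) : List String :=
  match seqs with
  | none =>
    if length < 0 then []  -- product(..., repeat=length) raises ValueError here; excluded by Pre_
    else
      let combos := (List.replicate length.toNat "ATGC".toList).foldl
        (fun acc pool => acc.flatMap (fun x => pool.map (fun c => x ++ [c]))) [[]]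
      combos.map (fun comb => String.ofList comb)
  | some s =>
    let combseq := s
    (PySem.List.pyRange 0 (PySem.Str.len combseq - length + 1) 1).map
      (fun i => PySem.Str.slice combseq (some i) (some (i + length)))

-- ===== PORT B =====
-- Python B's kth(k): `length` iterations of `s = atgc[k % 4] + s; k //= 4`;
-- the prepend is cons on List Char, joined by String.ofList at the end.
-- k % 4 is always 0..3 for k ≥ 0, so getD's default is only a totalizing guard.
def kthLoop : Nat → Int → List Char → List Char
  | 0, _, s => s
  | n + 1, k, s =>
    kthLoop n (PySem.Int.floordiv k 4) ("ATGC".toList.getD (PySem.Int.mod k 4).toNat 'A' :: s)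

def genparts_alt (length : Int) (seqs : Option String) : List String :=
  match seqs with
  | some s =>
    let combseq := s
    (PySem.List.pyRange 0 (PySem.Str.len combseq - length + 1) 1).map
      (fun i => PySem.Str.slice combseq (some i) (some (i + length)))
  | none =>
    -- range(4 ** length); length ≥ 0 under Pre_ (Python B raises on negative length)
    (PySem.List.pyRange 0 ((4 : Int) ^ length.toNat) 1).map
      (fun k => String.ofList (kthLoop length.toNat k []))

-- ===== PRECONDITION & SPEC =====
-- Pre_ excludes only seqs = None with negative length, where Python A raises
-- ValueError (product repeat<0) and Python B raises TypeError (range(4**-1)).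
def Pre_genparts (length : Int) (seqs : Option String) : Prop := seqs = none → 0 ≤ length
instance (length : Int) (seqs : Option String) : Decidable (Pre_genparts length seqs) := by unfold Pre_genparts; infer_instance
def pvWitness_genparts : Int × Option String := (2, none)

def Spec_genparts (length : Int) (seqs : Option String) (out : List String) : Prop := out = genparts_alt length seqs
instance (length : Int) (seqs : Option String) (out : List String) : Decidable (Spec_genparts length seqs out) := by unfold Spec_genparts; infer_instance

-- ===== CLAIM (what is proved, stated in full; the proofs are below) =====
def Claim_equal_genparts : Prop := ∀ (length : Int) (seqs : Option String), Dom_genparts length seqs → Pre_genparts length seqs → Spec_genparts length seqs (genparts length seqs)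

-- ===== LEMMAS AND PROOFS =====

theorem kthLoop_acc (n : Nat) (k : Int) (acc : List Char) :
    kthLoop n k acc = kthLoop n k [] ++ acc := by
  induction n generalizing k acc with
  | zero => rfl
  | succ n ih =>
    simp only [kthLoop]
    rw [ih _ ("ATGC".toList.getD (PySem.Int.mod k 4).toNat 'A' :: acc),
        ih _ [("ATGC".toList.getD (PySem.Int.mod k 4).toNat 'A')]]
    rw [List.append_assoc]
    rfl

theorem kth_unfold (n k : Nat) :
    kthLoop (n + 1) (Int.ofNat k) [] =
      kthLoop n (Int.ofNat (k / 4)) [] ++ ["ATGC".toList.getD (k % 4) 'A'] := by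
  have h4 : ((4 : Int)) = ((4 : Nat) : Int) := by norm_num
  have h1 : PySem.Int.floordiv (Int.ofNat k) 4 = Int.ofNat (k / 4) := by
    rw [Int.ofNat_eq_natCast, h4, PySem.Int.floordiv_natCast]
    simp
  have h2 : (PySem.Int.mod (Int.ofNat k) 4).toNat = k % 4 := by
    rw [Int.ofNat_eq_natCast, h4, PySem.Int.mod_natCast]
    exact Int.toNat_natCast _
  simp only [kthLoop, h1, h2]
  rw [kthLoop_acc]

theorem range_four_mul (m : Nat) :
    List.range (4 * m) = (List.range m).flatMap (fun q => [4 * q, 4 * q + 1, 4 * q + 2, 4 * q + 3]) := by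
  induction m with
  | zero => rfl
  | succ m ih =>
    have h : 4 * (m + 1) = (((4 * m + 1) + 1) + 1) + 1 := by ring
    rw [h, List.range_succ, List.range_succ, List.range_succ, List.range_succ, ih,
        List.range_succ, List.flatMap_append]
    simp

-- A's prefix-extension fold over n pools produces exactly the rank-decoded
-- sequences for ranks 0 .. 4^n - 1, in order.
theorem foldA_eq_rank (n : Nat) :
    (List.replicate n "ATGC".toList).foldl
      (fun acc pool => acc.flatMap (fun x => pool.map (fun c => x ++ [c]))) [[]]
    = (List.range (4 ^ n)).map (fun q : Nat => kthLoop n (Int.ofNat q) []) := by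
  induction n with
  | zero => rfl
  | succ n ih =>
    rw [List.replicate_succ', List.foldl_append, ih]
    have hpow : 4 ^ (n + 1) = 4 * 4 ^ n := by ring
    rw [hpow, range_four_mul, List.map_flatMap]
    simp only [List.foldl_cons, List.foldl_nil, List.flatMap_map]
    apply List.flatMap_congr  -- pointwise on q ∈ range (4^n)
    intro q _
    simp only [List.map_cons, List.map_nil]
    rw [kth_unfold n (4 * q), kth_unfold n (4 * q + 1),
        kth_unfold n (4 * q + 2), kth_unfold n (4 * q + 3)]
    have d0 : 4 * q / 4 = q := by omega
    have d1 : (4 * q + 1) / 4 = q := by omega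
    have d2 : (4 * q + 2) / 4 = q := by omega
    have d3 : (4 * q + 3) / 4 = q := by omega
    have m0 : 4 * q % 4 = 0 := by omega
    have m1 : (4 * q + 1) % 4 = 1 := by omega
    have m2 : (4 * q + 2) % 4 = 2 := by omega
    have m3 : (4 * q + 3) % 4 = 3 := by omega
    simp [d0, d1, d2, d3, m0, m1, m2, m3]

-- ===== VERDICT (by name: the statement is the Claim_ definition above) =====
theorem genparts_spec : Claim_equal_genparts := by
  intro length seqs _ hpre
  unfold Spec_genparts
  cases seqs with
  | some s => rfl
  | none =>
    have h0 : 0 ≤ length := hpre rfl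
    have hp : ((4 : Int) ^ length.toNat).toNat = 4 ^ length.toNat := by
      rw [show ((4 : Int) ^ length.toNat) = ((4 ^ length.toNat : Nat) : Int) from by push_cast; ring,
          Int.toNat_natCast]
    simp only [genparts, genparts_alt, if_neg (not_lt.mpr h0), foldA_eq_rank]
    rw [PySem.List.pyRange_one]
    simp [hp, List.map_map, Function.comp_def]
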